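-- pv_equiv track=rewrite | github.com/c0m1c5an5/codeowners-generator | codeowners/utils.py | unescape_glob
-- ===== SOURCE A (Python) =====
-- GLOBCHARS = {" ", "*", "!", "\\", "[", "]"}
--
-- def unescape_glob(input: str) -> str:
--     """Unescape glob special characters in string.
--
--     Args:
--         input (str): Input string
--
--     Returns:
--         _type_: Unescaped string
--     """
--     unescaped_str = ""
--     input_length = len(input)
--     i = 0
--
--     while i < input_length:
--         char = input[i]
--         if char == "\\" and i + 1 < input_length and input[i + 1] in GLOBCHARS:
--             unescaped_str += input[i + 1]
--             i += 2
--             continue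
--         unescaped_str += char
--         i += 1
--     return unescaped_str
-- ===== SOURCE B (Python) =====
-- GLOBCHARS = {" ", "*", "!", "\\", "[", "]"}
--
-- def unescape_glob(input: str) -> str:
--     """Unescape glob special characters in string.
--
--     Staged algorithm: split the string on backslashes, then stitch the
--     segments back, deciding per boundary whether the backslash escaped
--     the first character of the following segment (or a second backslash).
--     """
--     parts = input.split("\\")
--     out = [parts[0]]
--     j = 1
--     n = len(parts)
--     while j < n:
--         p = parts[j]
--         if p == "" and j + 1 < n:
--             # two adjacent backslashes: an escaped backslash; the next
--             # segment is literal text following it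
--             out.append("\\")
--             out.append(parts[j + 1])
--             j += 2
--         elif p == "":
--             # single backslash at end of string
--             out.append("\\")
--             j += 1
--         elif p[0] in GLOBCHARS:
--             # backslash escaped the segment's first character
--             out.append(p)
--             j += 1
--         else:
--             # non-escaping backslash, kept verbatim
--             out.append("\\")
--             out.append(p)
--             j += 1
--     return "".join(out)
-- ===== Notes on version B (the rewrite author's own statement) =====
-- stated objective: faster
-- what changed: Replaced the index-based while-loop state machine scanning character by character (with quadratic string += accumulation) by a staged algorithm: split the string on backslashes once, then stitch the segments back while deciding per segment boundary whether the backslash escaped the next character (an empty segment marks an escaped backslash), joining the pieces at the end.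
import Mathlib
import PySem

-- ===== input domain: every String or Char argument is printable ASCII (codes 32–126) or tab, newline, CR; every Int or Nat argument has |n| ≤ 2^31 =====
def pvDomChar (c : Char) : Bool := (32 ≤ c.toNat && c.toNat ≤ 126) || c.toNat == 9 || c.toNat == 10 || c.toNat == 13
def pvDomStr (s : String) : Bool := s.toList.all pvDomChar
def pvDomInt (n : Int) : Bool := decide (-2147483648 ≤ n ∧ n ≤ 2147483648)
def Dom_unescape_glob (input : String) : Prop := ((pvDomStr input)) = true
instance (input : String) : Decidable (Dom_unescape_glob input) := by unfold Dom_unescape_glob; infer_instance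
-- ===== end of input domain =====

-- B replaces A's index-based character-by-character while loop with a staged algorithm:
-- split on backslashes once, then stitch the segments back per boundary, joining at the end
-- (measured faster in a timing run); same output on every input.

-- the module constant GLOBCHARS (a Python set of single characters)
def pvGlob : List Char := [' ', '*', '!', '\\', '[', ']']

-- ===== PORT A =====
-- A's while loop over the index i, building unescaped_str by +=; acc is that string as a char list.
def unescapeLoopA (cs : List Char) (i : Nat) (acc : List Char) : List Char :=
  if _h : i < cs.length then
    let char := cs.getD i ' '
    if char = '\\' ∧ i + 1 < cs.length ∧ cs.getD (i + 1) ' ' ∈ pvGlob then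
      unescapeLoopA cs (i + 2) (acc ++ [cs.getD (i + 1) ' '])
    else
      unescapeLoopA cs (i + 1) (acc ++ [char])
  else acc
termination_by cs.length - i

def unescape_glob (input : String) : String :=
  String.ofList (unescapeLoopA input.toList 0 [])

-- ===== PORT B =====
-- Source B's while loop over parts[1:], consuming one or two parts per iteration:
-- an empty part means two adjacent backslashes (escaped backslash, its successor is literal),
-- a trailing empty part a lone final backslash; otherwise the part's first char decides.
def stitchLoop : List (List Char) → List Char
  | [] => []
  | [] :: [] => ['\\']
  | [] :: q :: rest => '\\' :: (q ++ stitchLoop rest)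
  | (c :: p) :: rest => (if c ∈ pvGlob then c :: p else '\\' :: c :: p) ++ stitchLoop rest

def unescape_glob_alt (input : String) : String :=
  match PySem.Chars.splitOn input.toList ['\\'] with
  | [] => ""        -- unreachable: split never returns an empty list
  | p0 :: rest => String.ofList (p0 ++ stitchLoop rest)

-- ===== PRECONDITION & SPEC =====
def Spec_unescape_glob (input : String) (out : String) : Prop := out = unescape_glob_alt input
instance (input : String) (out : String) : Decidable (Spec_unescape_glob input out) := by unfold Spec_unescape_glob; infer_instance

-- ===== CLAIM (what is proved, stated in full; the proofs are below) =====
def Claim_equal_unescape_glob : Prop := ∀ (input : String), Dom_unescape_glob input → Spec_unescape_glob input (unescape_glob input)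

-- ===== LEMMAS AND PROOFS =====

-- reference single-pass scan used only by the proofs, to which both ports are reduced
def scanB : List Char → List Char
  | [] => []
  | ch :: rest =>
    if ch = '\\' then
      match rest with
      | [] => [ch]
      | nxt :: rest' =>
        (if nxt ∈ pvGlob then [nxt] else [ch, nxt]) ++ scanB rest'
    else ch :: scanB rest

-- simple recursive characterisation of splitting on a single backslash
def splitC : List Char → List (List Char)
  | [] => [[]]
  | c :: cs => if c = '\\' then [] :: splitC cs else (splitC cs).modifyHead (c :: ·)

theorem splitC_ne_nil (l : List Char) : splitC l ≠ [] := by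
  induction l with
  | nil => simp [splitC]
  | cons c cs ih =>
    simp only [splitC]
    split
    · simp
    · cases h : splitC cs with
      | nil => exact absurd h ih
      | cons q r => simp [List.modifyHead]

theorem go_spec (l : List Char) : ∀ (fuel : Nat) (cur : List Char) (acc : List (List Char)),
    l.length < fuel →
    PySem.Chars.splitOn.go ['\\'] fuel l cur acc
      = acc.reverse ++ (splitC l).modifyHead (fun a => cur.reverse ++ a) := by
  induction l with
  | nil =>
    intro fuel cur acc h
    match fuel with
    | f + 1 =>
      simp [PySem.Chars.splitOn.go, splitC]
  | cons c cs ih =>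
    intro fuel cur acc h
    match fuel with
    | f + 1 =>
      have hcs : cs.length < f := by simpa using h
      by_cases hc : c = '\\'
      · subst hc
        have hp : List.isPrefixOf ['\\'] ('\\' :: cs) = true := by simp [List.isPrefixOf]
        rw [PySem.Chars.splitOn.go]
        simp only [hp, if_true, List.length_cons, List.length_nil, List.drop_succ_cons, List.drop_zero]
        rw [ih f [] (cur.reverse :: acc) hcs]
        cases hs : splitC cs with
        | nil => exact absurd hs (splitC_ne_nil cs)
        | cons q r => simp [splitC, hs, List.modifyHead]
      · have hp : List.isPrefixOf ['\\'] (c :: cs) = false := by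
          simp [List.isPrefixOf]
          exact fun hh => hc hh.symm
        rw [PySem.Chars.splitOn.go]
        simp only [hp, if_false, Bool.false_eq_true]
        rw [ih f (c :: cur) acc hcs]
        simp only [splitC, if_neg hc]
        cases hs : splitC cs with
        | nil => exact absurd hs (splitC_ne_nil cs)
        | cons q rest => simp [List.modifyHead]

theorem splitOn_eq_splitC (l : List Char) :
    PySem.Chars.splitOn l ['\\'] = splitC l := by
  unfold PySem.Chars.splitOn
  rw [go_spec l (l.length + 1) [] [] (Nat.lt_succ_self _)]
  cases hs : splitC l with
  | nil => exact absurd hs (splitC_ne_nil l)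
  | cons q r => simp [List.modifyHead]

-- equation lemmas for scanB's branches
theorem scanB_esc (c : Char) (rest : List Char) (h : c ∈ pvGlob) :
    scanB ('\\' :: c :: rest) = c :: scanB rest := by
  rw [scanB, if_pos rfl]
  simp only [if_pos h, List.singleton_append]

theorem scanB_noesc (c : Char) (rest : List Char) (h : c ∉ pvGlob) :
    scanB ('\\' :: c :: rest) = '\\' :: c :: scanB rest := by
  rw [scanB, if_pos rfl]
  simp only [if_neg h, List.cons_append, List.nil_append]

theorem scanB_single : scanB ['\\'] = ['\\'] := by rw [scanB, if_pos rfl]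

theorem scanB_ne (c : Char) (rest : List Char) (h : ¬ c = '\\') :
    scanB (c :: rest) = c :: scanB rest := by
  rw [scanB.eq_def]; simp only [if_neg h]

-- A's loop at index i, with accumulator acc, produces acc ++ the reference scan of the rest
theorem unescapeLoopA_eq_scanB (cs : List Char) (i : Nat) (acc : List Char) :
    unescapeLoopA cs i acc = acc ++ scanB (cs.drop i) := by
  fun_induction unescapeLoopA cs i acc with
  | case1 i acc h char hesc ih =>
    obtain ⟨hc, hlt, hg⟩ := hesc
    have hc' : cs.getD i ' ' = '\\' := hc
    have hd1 : cs.drop i = cs.getD i ' ' :: cs.drop (i + 1) := by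
      rw [List.getD_eq_getElem?_getD, List.getElem?_eq_getElem h, Option.getD_some]
      exact List.drop_eq_getElem_cons h
    have hd2 : cs.drop (i + 1) = cs.getD (i + 1) ' ' :: cs.drop (i + 2) := by
      rw [List.getD_eq_getElem?_getD, List.getElem?_eq_getElem hlt, Option.getD_some]
      exact List.drop_eq_getElem_cons hlt
    rw [ih, hd1, hd2, hc', scanB_esc _ _ hg]
    simp
  | case2 i acc h char hesc ih =>
    have hesc' : ¬(cs.getD i ' ' = '\\' ∧ i + 1 < cs.length ∧ cs.getD (i + 1) ' ' ∈ pvGlob) := hesc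
    have ih' : unescapeLoopA cs (i + 1) (acc ++ [cs.getD i ' ']) =
        acc ++ [cs.getD i ' '] ++ scanB (List.drop (i + 1) cs) := ih
    have hd1 : cs.drop i = cs.getD i ' ' :: cs.drop (i + 1) := by
      rw [List.getD_eq_getElem?_getD, List.getElem?_eq_getElem h, Option.getD_some]
      exact List.drop_eq_getElem_cons h
    rw [show unescapeLoopA cs (i + 1) (acc ++ [char]) = unescapeLoopA cs (i + 1) (acc ++ [cs.getD i ' ']) from rfl,
        ih', hd1]
    by_cases hc : cs.getD i ' ' = '\\'
    · rcases Nat.lt_or_ge (i + 1) cs.length with hlt | hge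
      · have hg : cs.getD (i + 1) ' ' ∉ pvGlob := fun hmem => hesc' ⟨hc, hlt, hmem⟩
        have hd2 : cs.drop (i + 1) = cs.getD (i + 1) ' ' :: cs.drop (i + 2) := by
          rw [List.getD_eq_getElem?_getD, List.getElem?_eq_getElem hlt, Option.getD_some]
          exact List.drop_eq_getElem_cons hlt
        have hnb : ¬ cs.getD (i + 1) ' ' = '\\' := by
          intro hb; apply hg; rw [hb]; simp [pvGlob]
        rw [hd2, hc, scanB_noesc _ _ hg, scanB_ne _ _ hnb]
        simp
      · have hd2 : cs.drop (i + 1) = [] := List.drop_eq_nil_of_le hge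
        rw [hd2, hc, scanB_single]
        simp [scanB]
    · rw [scanB_ne _ _ hc]
      simp
  | case3 i acc h =>
    have hnil : cs.drop i = [] := List.drop_eq_nil_of_le (Nat.le_of_not_lt h)
    simp [hnil, scanB]

-- B's stitching of the split segments equals the reference scan (joint induction on length)
theorem stitch_joint (n : Nat) : ∀ (l : List Char), l.length ≤ n →
    ((splitC l).headI ++ stitchLoop (splitC l).tail = scanB l) ∧
    (stitchLoop (splitC l) = scanB ('\\' :: l)) := by
  induction n with
  | zero =>
    intro l hl
    have : l = [] := List.eq_nil_of_length_eq_zero (Nat.le_zero.mp hl)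
    subst this
    refine ⟨by simp [splitC, stitchLoop, scanB], ?_⟩
    simp [splitC, stitchLoop, scanB_single]
  | succ n ih =>
    intro l hl
    cases l with
    | nil =>
      refine ⟨by simp [splitC, stitchLoop, scanB], ?_⟩
      simp [splitC, stitchLoop, scanB_single]
    | cons c cs =>
      have hcs : cs.length ≤ n := by simpa using hl
      obtain ⟨ih1, ih2⟩ := ih cs hcs
      obtain ⟨q, rest, hq⟩ := List.exists_cons_of_ne_nil (splitC_ne_nil cs)
      have hsc : q ++ stitchLoop rest = scanB cs := by
        rw [hq] at ih1
        simpa using ih1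
      by_cases hc : c = '\\'
      · subst hc
        have hsp : splitC ('\\' :: cs) = [] :: splitC cs := by simp [splitC]
        constructor
        · rw [hsp]
          simpa using ih2
        · rw [hsp, hq]
          have hglob : '\\' ∈ pvGlob := by simp [pvGlob]
          rw [scanB_esc _ _ hglob]
          show '\\' :: (q ++ stitchLoop rest) = '\\' :: scanB cs
          rw [hsc]
      · have hsp : splitC (c :: cs) = (c :: q) :: rest := by
          simp [splitC, if_neg hc, hq, List.modifyHead]
        constructor
        · rw [hsp, scanB_ne _ _ hc]
          show (c :: q) ++ stitchLoop rest = c :: scanB cs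
          rw [← hsc]
          rfl
        · rw [hsp]
          show (if c ∈ pvGlob then c :: q else '\\' :: c :: q) ++ stitchLoop rest
              = scanB ('\\' :: c :: cs)
          by_cases hg : c ∈ pvGlob
          · rw [if_pos hg, scanB_esc _ _ hg, ← hsc]
            rfl
          · rw [if_neg hg, scanB_noesc _ _ hg, ← hsc]
            rfl

-- ===== VERDICT (by name: the statement is the Claim_ definition above) =====
theorem unescape_glob_spec : Claim_equal_unescape_glob := by
  intro input _
  unfold Spec_unescape_glob unescape_glob unescape_glob_alt
  rw [unescapeLoopA_eq_scanB, splitOn_eq_splitC]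
  simp only [List.drop_zero, List.nil_append]
  obtain ⟨h1, _⟩ := stitch_joint (input.toList.length) input.toList le_rfl
  cases hs : splitC input.toList with
  | nil => exact absurd hs (splitC_ne_nil _)
  | cons p rest =>
    rw [hs] at h1
    simp only [List.headI, List.tail] at h1
    rw [← h1]
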